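-- pv_equiv track=rewrite | github.com/Nico-Oz-ops/ITS_Python | Esercizi_Vari/Collection_and_more/Esercizio_12.py | miglior_voto_per_materia
-- ===== SOURCE A (Python) =====
-- def miglior_voto_per_materia(studenti: list[dict[str, dict[str, list[int]]]]) -> dict[str, int]:
--     risultato = {}
--
--     for studente in studenti:
--         for materia in studente["materie"]:
--             voto_max = max(studente["materie"][materia])
--             if materia not in risultato:
--                 risultato[materia] = voto_max
--             # al posto di if ed elif si poteva aggiungere un or, cioè if materia not in risultato or voto_max > risultato[materia]
--             elif voto_max > risultato[materia]:
--                 risultato[materia] = voto_max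
--     return risultato
-- ===== SOURCE B (Python) =====
-- def miglior_voto_per_materia(studenti: list[dict[str, dict[str, list[int]]]]) -> dict[str, int]:
--     # pass 1: collect each student's best grade per subject
--     grouped = {}
--     for studente in studenti:
--         for materia, voti in studente["materie"].items():
--             grouped.setdefault(materia, []).append(max(voti))
--     # pass 2: reduce each subject's collected maxima
--     return {materia: max(vals) for materia, vals in grouped.items()}
-- ===== Notes on version B (the rewrite author's own statement) =====
-- stated objective: alternative
-- what changed: Replaces A's single-pass running-max with conditional dict updates by a two-phase collect-then-reduce: group every student's per-subject maximum into lists, then take max of each list in a final dict comprehension.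
import Mathlib
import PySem

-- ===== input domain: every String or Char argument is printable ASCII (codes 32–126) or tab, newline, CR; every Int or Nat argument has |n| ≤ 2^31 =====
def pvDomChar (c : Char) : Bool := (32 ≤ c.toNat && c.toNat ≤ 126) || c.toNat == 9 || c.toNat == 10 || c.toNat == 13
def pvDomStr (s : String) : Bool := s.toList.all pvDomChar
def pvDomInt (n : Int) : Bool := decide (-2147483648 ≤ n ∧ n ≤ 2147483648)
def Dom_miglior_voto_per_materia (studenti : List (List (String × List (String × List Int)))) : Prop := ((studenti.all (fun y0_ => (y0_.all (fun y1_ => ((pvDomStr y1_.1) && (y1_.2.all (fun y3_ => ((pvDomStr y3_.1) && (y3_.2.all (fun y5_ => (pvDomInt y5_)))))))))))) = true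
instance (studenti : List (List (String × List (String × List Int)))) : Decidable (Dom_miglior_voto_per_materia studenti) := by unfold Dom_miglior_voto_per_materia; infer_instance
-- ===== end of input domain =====

-- B replaces A's single-pass running-max dict by a two-phase collect-then-reduce (group the
-- per-student maxima into lists, then take the max of each list); same cost, different structure.

-- max(l) for a nonempty Python list of ints (0 is never observed inside Pre_, where lists are nonempty)
def pyMaxInt (l : List Int) : Int := (PySem.List.max? l (fun y => y)).getD 0

-- ===== PORT A =====
-- body of A's inner loop: the if / elif chain on 'risultato'
def aStep (ris : PySem.Dict String Int) (materia : String) (voto_max : Int) : PySem.Dict String Int :=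
  if ris.contains materia = false then ris.insert materia voto_max
  else if voto_max > ris.getD materia 0 then ris.insert materia voto_max
  else ris

-- one iteration of A's outer loop: 'for materia in studente["materie"]: …'
def aStudent (ris : PySem.Dict String Int) (studente : List (String × List (String × List Int))) : PySem.Dict String Int :=
  let materie := PySem.Dict.ofList ((PySem.Dict.ofList studente).getD "materie" [])
  materie.keys.foldl (fun ris materia => aStep ris materia (pyMaxInt (materie.getD materia []))) ris

def miglior_voto_per_materia (studenti : List (List (String × List (String × List Int)))) : List (String × Int) :=
  (studenti.foldl aStudent PySem.Dict.empty).items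

-- ===== PORT B =====
-- one iteration of B's pass-1 loop: 'grouped.setdefault(materia, []).append(max(voti))' per item
def bStudent (g : PySem.Dict String (List Int)) (studente : List (String × List (String × List Int))) : PySem.Dict String (List Int) :=
  let materie := PySem.Dict.ofList ((PySem.Dict.ofList studente).getD "materie" [])
  materie.items.foldl (fun g p => g.modify p.1 [] (fun vs => vs ++ [pyMaxInt p.2])) g

def miglior_voto_per_materia_alt (studenti : List (List (String × List (String × List Int)))) : List (String × Int) :=
  let grouped := studenti.foldl bStudent PySem.Dict.empty
  grouped.items.map (fun p => (p.1, pyMaxInt p.2))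

-- ===== PRECONDITION & SPEC =====
-- Pre_ excludes exactly the inputs on which A raises: a student dict without key "materie"
-- (KeyError) or a subject whose grade list is empty (max of an empty sequence raises ValueError).
def Pre_miglior_voto_per_materia (studenti : List (List (String × List (String × List Int)))) : Prop :=
  ∀ st ∈ studenti,
    (PySem.Dict.ofList st).contains "materie" = true ∧
    ∀ p ∈ (PySem.Dict.ofList ((PySem.Dict.ofList st).getD "materie" ([] : List (String × List Int)))).items, p.2 ≠ []
instance (studenti : List (List (String × List (String × List Int)))) : Decidable (Pre_miglior_voto_per_materia studenti) := by unfold Pre_miglior_voto_per_materia; infer_instance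

def pvWitness_miglior_voto_per_materia : (List (List (String × List (String × List Int)))) :=
  [[("materie", [("matematica", [7, 9]), ("storia", [6])])],
   [("materie", [("storia", [8, 2])])]]

def Spec_miglior_voto_per_materia (studenti : List (List (String × List (String × List Int)))) (out : List (String × Int)) : Prop := out = miglior_voto_per_materia_alt studenti
instance (studenti : List (List (String × List (String × List Int)))) (out : List (String × Int)) : Decidable (Spec_miglior_voto_per_materia studenti out) := by unfold Spec_miglior_voto_per_materia; infer_instance

-- ===== CLAIM (what is proved, stated in full; the proofs are below) =====
def Claim_equal_miglior_voto_per_materia : Prop := ∀ (studenti : List (List (String × List (String × List Int)))), Dom_miglior_voto_per_materia studenti → Pre_miglior_voto_per_materia studenti → Spec_miglior_voto_per_materia studenti (miglior_voto_per_materia studenti)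

-- ===== LEMMAS AND PROOFS =====

-- A's dict state is B's grouped dict with every list collapsed to its maximum
def mapMax (g : PySem.Dict String (List Int)) : PySem.Dict String Int :=
  PySem.Dict.mk (g.items.map (fun p => (p.1, pyMaxInt p.2)))

-- invariant of B's grouped dict
def GInv (g : PySem.Dict String (List Int)) : Prop :=
  g.keys.Nodup ∧ ∀ p ∈ g.items, p.2 ≠ []

lemma pyMaxInt_singleton (v : Int) : pyMaxInt [v] = v := by
  simp [pyMaxInt, PySem.List.max?_id_cons]

lemma pyMaxInt_append {l : List Int} (h : l ≠ []) (v : Int) :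
    pyMaxInt (l ++ [v]) = max (pyMaxInt l) v := by
  obtain ⟨x, t, rfl⟩ := List.exists_cons_of_ne_nil h
  simp [pyMaxInt, PySem.List.max?_id_cons, List.foldl_append]

lemma keys_mapMax (g : PySem.Dict String (List Int)) : (mapMax g).keys = g.keys := by
  simp [mapMax, PySem.Dict.keys]

lemma contains_mapMax (g : PySem.Dict String (List Int)) (k : String) :
    (mapMax g).contains k = g.contains k := by
  simp only [mapMax, PySem.Dict.contains, List.any_map]
  rfl

lemma step_comm (g : PySem.Dict String (List Int)) (k : String) (v : Int) (hg : GInv g) :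
    aStep (mapMax g) k v = mapMax (g.modify k [] (fun vs => vs ++ [v])) := by
  obtain ⟨hnd, hne⟩ := hg
  rcases hc : g.contains k with _ | _
  · -- key is new
    have hc' : (mapMax g).contains k = false := by rw [contains_mapMax, hc]
    apply PySem.Dict.ext
    rw [aStep, if_pos hc']
    rw [PySem.Dict.items_insert_of_not_contains _ _ hc']
    show _ = (PySem.Dict.insert g k _).items.map _
    rw [PySem.Dict.getD_of_not_contains _ _ hc]
    rw [PySem.Dict.items_insert_of_not_contains _ _ hc]
    simp [mapMax, pyMaxInt_singleton]
  · -- key already present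
    obtain ⟨l, hl⟩ : ∃ l, g.get? k = some l := by
      cases hgk : g.get? k with
      | none => rw [PySem.Dict.get?_eq_none_iff_contains] at hgk; simp [hgk] at hc
      | some l => exact ⟨l, rfl⟩
    have hlmem : (k, l) ∈ g.items := PySem.Dict.mem_items_of_get?_eq_some _ hl
    have hlne : l ≠ [] := hne _ hlmem
    have hgD : g.getD k [] = l := PySem.Dict.getD_of_mem_items _ hlmem hnd []
    have hmm : (k, pyMaxInt l) ∈ (mapMax g).items := by
      simp only [mapMax]
      exact List.mem_map.mpr ⟨(k, l), hlmem, rfl⟩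
    have hmnd : (mapMax g).keys.Nodup := by rw [keys_mapMax]; exact hnd
    have hmD : (mapMax g).getD k 0 = pyMaxInt l := PySem.Dict.getD_of_mem_items _ hmm hmnd 0
    have hc' : (mapMax g).contains k = true := by rw [contains_mapMax, hc]
    have hpt : ∀ p ∈ g.items, p.1 = k → p = (k, l) := by
      intro p hp h1
      have : g.get? p.1 = some p.2 := PySem.Dict.get?_of_mem_items _ (by exact hp) hnd
      rw [h1, hl] at this
      obtain ⟨a, b⟩ := p; cases this; simp_all
    -- RHS items
    have hR : (g.modify k [] (fun vs => vs ++ [v])).items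
        = g.items.map (fun p => if (p.1 == k) = true then (k, l ++ [v]) else p) := by
      show (g.insert k _).items = _
      rw [hgD, PySem.Dict.items_insert_of_contains _ _ hc]
    apply PySem.Dict.ext
    rw [aStep, hc', hmD]
    simp only [Bool.true_eq_false, if_false]
    by_cases hv : v > pyMaxInt l
    · rw [if_pos hv]
      rw [PySem.Dict.items_insert_of_contains _ _ hc']
      show _ = (g.modify k [] _).items.map _
      rw [hR]
      simp only [mapMax, List.map_map]
      apply List.map_congr_left
      intro p hp
      by_cases h1 : p.1 = k
      · have := hpt p hp h1
        subst this
        simp [pyMaxInt_append hlne, max_eq_right (le_of_lt hv), Function.comp]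
      · simp [Function.comp, h1]
    · rw [if_neg hv]
      show (mapMax g).items = (g.modify k [] _).items.map _
      rw [hR]
      simp only [mapMax, List.map_map]
      apply Eq.symm
      apply List.map_congr_left
      intro p hp
      by_cases h1 : p.1 = k
      · have := hpt p hp h1
        subst this
        have : max (pyMaxInt l) v = pyMaxInt l := max_eq_left (le_of_not_gt hv)
        simp [Function.comp, pyMaxInt_append hlne, this]
      · simp [Function.comp, h1]

lemma step_inv (g : PySem.Dict String (List Int)) (k : String) (v : Int) (hg : GInv g) :
    GInv (g.modify k [] (fun vs => vs ++ [v])) := by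
  obtain ⟨hnd, hne⟩ := hg
  constructor
  · exact PySem.Dict.nodup_keys_insert _ _ _ hnd
  · intro p hp
    rw [show g.modify k [] (fun vs => vs ++ [v]) = g.insert k (g.getD k [] ++ [v]) from rfl] at hp
    rw [PySem.Dict.mem_items_insert] at hp
    rcases hp with rfl | ⟨hp, _⟩
    · simp
    · exact hne _ hp

lemma loop_comm (ps : List (String × List Int)) :
    ∀ g : PySem.Dict String (List Int), GInv g →
      ps.foldl (fun r p => aStep r p.1 (pyMaxInt p.2)) (mapMax g)
        = mapMax (ps.foldl (fun g p => g.modify p.1 [] (fun vs => vs ++ [pyMaxInt p.2])) g)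
      ∧ GInv (ps.foldl (fun g p => g.modify p.1 [] (fun vs => vs ++ [pyMaxInt p.2])) g) := by
  induction ps with
  | nil => intro g hg; exact ⟨rfl, hg⟩
  | cons p t ih =>
    intro g hg
    simp only [List.foldl_cons]
    rw [step_comm g p.1 (pyMaxInt p.2) hg]
    exact ih _ (step_inv g p.1 (pyMaxInt p.2) hg)

lemma student_comm (studente : List (String × List (String × List Int)))
    (g : PySem.Dict String (List Int)) (hg : GInv g) :
    aStudent (mapMax g) studente = mapMax (bStudent g studente) ∧ GInv (bStudent g studente) := by
  rw [aStudent, bStudent]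
  set materie := PySem.Dict.ofList ((PySem.Dict.ofList studente).getD "materie" []) with hm
  have hnd : materie.keys.Nodup := PySem.Dict.nodup_keys_ofList _
  have hitems : materie.items = materie.keys.map (fun k => (k, materie.getD k [])) :=
    PySem.Dict.items_eq_map_keys materie hnd []
  have h1 : materie.items.foldl (fun r p => aStep r p.1 (pyMaxInt p.2)) (mapMax g)
      = materie.keys.foldl (fun ris materia => aStep ris materia (pyMaxInt (materie.getD materia []))) (mapMax g) := by
    rw [hitems, List.foldl_map]
  rw [← h1]
  exact loop_comm materie.items g hg

lemma outer_comm (studenti : List (List (String × List (String × List Int)))) :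
    ∀ g : PySem.Dict String (List Int), GInv g →
      studenti.foldl aStudent (mapMax g) = mapMax (studenti.foldl bStudent g)
      ∧ GInv (studenti.foldl bStudent g) := by
  induction studenti with
  | nil => intro g hg; exact ⟨rfl, hg⟩
  | cons st t ih =>
    intro g hg
    simp only [List.foldl_cons]
    obtain ⟨h1, h2⟩ := student_comm st g hg
    rw [h1]
    exact ih _ h2

-- ===== VERDICT (by name: the statement is the Claim_ definition above) =====
theorem miglior_voto_per_materia_spec : Claim_equal_miglior_voto_per_materia := by
  intro studenti _ _
  unfold Spec_miglior_voto_per_materia miglior_voto_per_materia miglior_voto_per_materia_alt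
  have hg : GInv PySem.Dict.empty := ⟨PySem.Dict.nodup_keys_empty, by intro p hp; simp [PySem.Dict.empty] at hp⟩
  have hE : mapMax PySem.Dict.empty = PySem.Dict.empty := rfl
  obtain ⟨h1, _⟩ := outer_comm studenti PySem.Dict.empty hg
  rw [hE] at h1
  rw [h1]
  rfl
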